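-- pv_equiv track=rewrite | github.com/Revi1337/BaekJoon-Coding-Test | 백준/Silver/1895. 필터/필터.py | solution
-- ===== SOURCE A (Python) =====
-- def solution(R, C, board, T):
--     total = []
--     for i in range(R - 2):
--         for j in range(C - 2):
--             arr = []
--             for k in range(3):
--                 for l in range(3):
--                     arr.append(board[i + k][j + l])
--             arr.sort()
--             total.append(arr[4])
--
--     ans = 0
--     for i in total:
--         if i >= T:
--             ans += 1
--     return ans
-- ===== SOURCE B (Python) =====
-- def solution(R, C, board, T):
--     if R < 3 or C < 3:
--         return 0
--     hits = [[1 if x >= T else 0 for x in row[:C]] for row in board[:R]]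
--     ans = 0
--     for r0, r1, r2 in zip(hits, hits[1:], hits[2:]):
--         cols = [a + b + c for a, b, c in zip(r0, r1, r2)]
--         for j in range(C - 2):
--             if cols[j] + cols[j + 1] + cols[j + 2] >= 5:
--                 ans += 1
--     return ans
-- ===== Notes on version B (the rewrite author's own statement) =====
-- stated objective: alternative
-- what changed: A sorts each 3x3 window and tests its median (sorted[4]) >= T over a collected medians list; B never sorts: it builds a 0/1 indicator grid (cell >= T), sums indicator rows three at a time into per-column triple sums via zip, and counts positions where three consecutive column sums total >= 5 (median >= T iff at least 5 of the 9 cells are >= T).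
import Mathlib
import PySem

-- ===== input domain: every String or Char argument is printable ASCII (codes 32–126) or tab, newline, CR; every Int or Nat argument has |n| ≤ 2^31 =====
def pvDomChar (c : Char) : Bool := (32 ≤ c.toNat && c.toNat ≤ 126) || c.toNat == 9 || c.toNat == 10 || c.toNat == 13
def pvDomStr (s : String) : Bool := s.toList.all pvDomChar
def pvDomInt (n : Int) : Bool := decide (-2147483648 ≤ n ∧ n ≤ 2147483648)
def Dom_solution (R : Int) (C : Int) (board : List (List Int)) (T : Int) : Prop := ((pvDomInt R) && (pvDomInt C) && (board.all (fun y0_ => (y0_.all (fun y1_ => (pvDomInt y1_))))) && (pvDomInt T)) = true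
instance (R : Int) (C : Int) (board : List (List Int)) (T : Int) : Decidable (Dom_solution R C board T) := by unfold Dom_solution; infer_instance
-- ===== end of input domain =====

-- B replaces A's per-window sort-and-take-median over a collected medians list by an indicator
-- grid with zipped row-triple column sums, counting positions whose three consecutive column
-- sums total ≥ 5 (median ≥ T iff at least 5 of the 9 cells are ≥ T): a different algorithm, no sort.

-- ===== PORT A =====
-- board[x][y] is ported as pyGetD (IndexError excluded by Pre_solution).
def solution (R : Int) (C : Int) (board : List (List Int)) (T : Int) : Int :=
  let total : List Int :=
    (PySem.List.pyRange 0 (R - 2) 1).foldl (fun total i =>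
      (PySem.List.pyRange 0 (C - 2) 1).foldl (fun total j =>
        let arr : List Int :=
          (PySem.List.pyRange 0 3 1).foldl (fun arr k =>
            (PySem.List.pyRange 0 3 1).foldl (fun arr l =>
              arr ++ [PySem.List.pyGetD (PySem.List.pyGetD board (i + k) []) (j + l) 0]) arr) []
        let arr := PySem.List.sorted arr (fun x => x)
        total ++ [PySem.List.pyGetD arr 4 0]) total) []
  total.foldl (fun ans x => if x ≥ T then ans + 1 else ans) 0

-- ===== PORT B =====
-- per row triple: cols = [a+b+c for a,b,c in zip(r0,r1,r2)], then the j-loop over range(C-2)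
def pvInnerB (C : Int) (r0 r1 r2 : List Int) (ans : Int) : Int :=
  let cols : List Int := ((r0.zip r1).zip r2).map (fun p => p.1.1 + p.1.2 + p.2)
  (PySem.List.pyRange 0 (C - 2) 1).foldl (fun ans j =>
    if PySem.List.pyGetD cols j 0 + PySem.List.pyGetD cols (j + 1) 0 + PySem.List.pyGetD cols (j + 2) 0 ≥ 5
    then ans + 1 else ans) ans

-- 'for r0, r1, r2 in zip(hits, hits[1:], hits[2:])'
def pvRowLoopB (C : Int) : List (List Int) → List (List Int) → List (List Int) → Int → Int
  | r0 :: a, r1 :: b, r2 :: c, ans => pvRowLoopB C a b c (pvInnerB C r0 r1 r2 ans)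
  | _, _, _, ans => ans

def solution_alt (R : Int) (C : Int) (board : List (List Int)) (T : Int) : Int :=
  if R < 3 ∨ C < 3 then 0
  else
    let hits : List (List Int) :=
      (PySem.List.slice board none (some R)).map (fun row =>
        (PySem.List.slice row none (some C)).map (fun x => if x ≥ T then (1 : Int) else 0))
    pvRowLoopB C hits (PySem.List.slice hits (some 1) none) (PySem.List.slice hits (some 2) none) 0

-- ===== PRECONDITION & SPEC =====
-- When R ≥ 3 and C ≥ 3 the Python A reads rows 0..R-1 and columns 0..C-1 of each such row,
-- raising IndexError if any is missing; otherwise no cell is read. Pre_ admits exactly the non-raising inputs.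
def Pre_solution (R : Int) (C : Int) (board : List (List Int)) (T : Int) : Prop :=
  (3 ≤ R ∧ 3 ≤ C) → (R ≤ (board.length : Int) ∧ ∀ row ∈ board.take R.toNat, C ≤ (row.length : Int))
instance (R : Int) (C : Int) (board : List (List Int)) (T : Int) : Decidable (Pre_solution R C board T) := by unfold Pre_solution; infer_instance
def pvWitness_solution : Int × Int × List (List Int) × Int := (3, 3, [[1, 2, 3], [4, 5, 6], [7, 8, 9]], 5)

def Spec_solution (R : Int) (C : Int) (board : List (List Int)) (T : Int) (out : Int) : Prop := out = solution_alt R C board T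
instance (R : Int) (C : Int) (board : List (List Int)) (T : Int) (out : Int) : Decidable (Spec_solution R C board T out) := by unfold Spec_solution; infer_instance

-- ===== CLAIM (what is proved, stated in full; the proofs are below) =====
def Claim_equal_solution : Prop := ∀ (R : Int) (C : Int) (board : List (List Int)) (T : Int), Dom_solution R C board T → Pre_solution R C board T → Spec_solution R C board T (solution R C board T)

-- ===== LEMMAS AND PROOFS =====

/-- Indicator 'cell ≥ T'. -/
def pvInd (T x : Int) : Int := if x ≥ T then 1 else 0

/-- One cell access as A performs it. -/
def pvCell (board : List (List Int)) (i j k l : Int) : Int :=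
  PySem.List.pyGetD (PySem.List.pyGetD board (i + k) []) (j + l) 0

/-- The 9 cells of the window at (i, j), in A's traversal order. -/
def pvWin (board : List (List Int)) (i j : Int) : List Int :=
  [pvCell board i j 0 0, pvCell board i j 0 1, pvCell board i j 0 2,
   pvCell board i j 1 0, pvCell board i j 1 1, pvCell board i j 1 2,
   pvCell board i j 2 0, pvCell board i j 2 1, pvCell board i j 2 2]

/-- Count of window cells ≥ T, as a sum of indicators. -/
def pvW (board : List (List Int)) (T i j : Int) : Int :=
  ((pvWin board i j).map (pvInd T)).sum

lemma pyRange03 : PySem.List.pyRange 0 3 1 = [0, 1, 2] := by decide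

/-- A's inner double fold builds exactly the window list. -/
lemma arr_eq (board : List (List Int)) (i j : Int) :
    (PySem.List.pyRange 0 3 1).foldl (fun arr k =>
      (PySem.List.pyRange 0 3 1).foldl (fun arr l =>
        arr ++ [PySem.List.pyGetD (PySem.List.pyGetD board (i + k) []) (j + l) 0]) arr) [] =
    pvWin board i j := by
  simp [pyRange03, pvWin, pvCell, List.foldl]

set_option maxHeartbeats 3200000 in
/-- For a 9-element list, the sorted median is ≥ T iff the indicator sum is ≥ 5. -/
lemma med_count (w : List Int) (hw : w.length = 9) (T : Int) :
    (PySem.List.pyGetD (PySem.List.sorted w (fun x => x)) 4 0 ≥ T) ↔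
      5 ≤ (w.map (pvInd T)).sum := by
  have hperm := PySem.List.sorted_perm w (fun x => x) false
  have hpair := PySem.List.sorted_pairwise w (fun x => x)
  have hsum : (w.map (pvInd T)).sum = ((PySem.List.sorted w (fun x => x)).map (pvInd T)).sum :=
    ((hperm.map (pvInd T)).sum_eq).symm
  rw [hsum]
  have hlen : (PySem.List.sorted w (fun x => x)).length = 9 := by rw [hperm.length_eq, hw]
  set s := PySem.List.sorted w (fun x => x) with hsdef
  clear_value s
  clear hperm hsdef hw hsum
  obtain ⟨c0, c1, c2, c3, c4, c5, c6, c7, c8, rfl⟩ :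
      ∃ c0 c1 c2 c3 c4 c5 c6 c7 c8, s = [c0, c1, c2, c3, c4, c5, c6, c7, c8] := by
    rcases s with _ | ⟨c0, _ | ⟨c1, _ | ⟨c2, _ | ⟨c3, _ | ⟨c4, _ | ⟨c5, _ | ⟨c6, _ | ⟨c7, _ | ⟨c8, _ | ⟨c9, s⟩⟩⟩⟩⟩⟩⟩⟩⟩⟩ <;> simp at hlen
    exact ⟨c0, c1, c2, c3, c4, c5, c6, c7, c8, rfl⟩
  simp only [List.pairwise_cons, List.mem_cons, List.not_mem_nil,
    forall_eq_or_imp, IsEmpty.forall_iff, and_true, List.Pairwise.nil] at hpair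
  obtain ⟨⟨h01, h02, h03, h04, h05, h06, h07, h08⟩, ⟨h12, h13, h14, h15, h16, h17, h18⟩,
    ⟨h23, h24, h25, h26, h27, h28⟩, ⟨h34, h35, h36, h37, h38⟩, ⟨h45, h46, h47, h48⟩,
    ⟨h56, h57, h58⟩, ⟨h67, h68⟩, h78⟩ := hpair
  have hmed : PySem.List.pyGetD [c0, c1, c2, c3, c4, c5, c6, c7, c8] (4 : Int) 0 = c4 := by
    simp [PySem.List.pyGetD, PySem.List.pyGet?, PySem.List.pyIdx?]
  rw [hmed]
  simp only [List.map_cons, List.map_nil, List.sum_cons, List.sum_nil, pvInd, ge_iff_le]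
  split_ifs <;> omega

/-- Building total by appending singletons = map. -/
lemma inner_total (m : Int → Int) (js : List Int) (t : List Int) :
    js.foldl (fun t j => t ++ [m j]) t = t ++ js.map m := by
  induction js generalizing t with
  | nil => simp
  | cons j js ih => simp [ih]

lemma outer_total (m : Int → Int → Int) (is js : List Int) (t : List Int) :
    is.foldl (fun t i => js.foldl (fun t j => t ++ [m i j]) t) t =
      t ++ is.flatMap (fun i => js.map (m i)) := by
  induction is generalizing t with
  | nil => simp
  | cons i is ih =>
      rw [List.foldl_cons, inner_total, ih, List.flatMap_cons, List.append_assoc]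

lemma fold_flat (f : Int → Int → Int) (is js : List Int)
    (g : Int → Int → Int) (a : Int) :
    (is.flatMap (fun i => js.map (g i))).foldl f a =
      is.foldl (fun a i => js.foldl (fun a j => f a (g i j)) a) a := by
  induction is generalizing a with
  | nil => simp
  | cons i is ih => simp [List.foldl_append, List.foldl_map, ih]

/-- A's count-over-the-built-total equals the nested counting fold. -/
lemma total_count (is js : List Int) (m : Int → Int → Int) (T : Int) :
    (is.foldl (fun t i => js.foldl (fun t j => t ++ [m i j]) t) []).foldl
        (fun ans x => if x ≥ T then ans + 1 else ans) (0 : Int) =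
      is.foldl (fun a i => js.foldl (fun a j => if m i j ≥ T then a + 1 else a) a) 0 := by
  rw [outer_total, List.nil_append, fold_flat]

lemma foldl_funext {f g : Int → Int → Int} (h : ∀ a x, f a x = g a x) (l : List Int) (a : Int) :
    l.foldl f a = l.foldl g a := by
  have hfg : f = g := funext fun a => funext (h a)
  rw [hfg]

/-- A as a nested fold testing the window indicator sum. -/
lemma solution_char (R C : Int) (board : List (List Int)) (T : Int) :
    solution R C board T =
      (PySem.List.pyRange 0 (R - 2) 1).foldl (fun a i =>
        (PySem.List.pyRange 0 (C - 2) 1).foldl (fun a j =>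
          if 5 ≤ pvW board T i j then a + 1 else a) a) 0 := by
  have h2 : solution R C board T =
      ((PySem.List.pyRange 0 (R - 2) 1).foldl (fun t i =>
        (PySem.List.pyRange 0 (C - 2) 1).foldl (fun t j =>
          t ++ [PySem.List.pyGetD (PySem.List.sorted (pvWin board i j) (fun x => x)) 4 0]) t) []).foldl
        (fun ans x => if x ≥ T then ans + 1 else ans) 0 := by
    simp only [solution, arr_eq]
  rw [h2, total_count]
  refine foldl_funext (fun a i => foldl_funext (fun a j => ?_) _ a) _ 0
  exact if_congr (med_count (pvWin board i j) (by simp [pvWin]) T) rfl rfl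

/-- B's row loop over the three shifted lists as a fold over indices. -/
lemma rowLoop_eq (C : Int) (l : List (List Int)) (ans : Int) :
    pvRowLoopB C l (l.drop 1) (l.drop 2) ans =
      (List.range (l.length - 2)).foldl (fun ans i =>
        pvInnerB C (l.getD i []) (l.getD (i + 1) []) (l.getD (i + 2) []) ans) ans := by
  induction l generalizing ans with
  | nil => simp [pvRowLoopB]
  | cons x l ih =>
    cases l with
    | nil => simp [pvRowLoopB]
    | cons y l =>
      cases l with
      | nil => simp [pvRowLoopB]
      | cons z l =>
        have h2 : (x :: y :: z :: l).length - 2 = (y :: z :: l).length - 2 + 1 := by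
          simp
        rw [h2, List.range_succ_eq_map]
        simp only [List.foldl_cons, List.foldl_map]
        have := ih (pvInnerB C x y z ans)
        simp only [List.drop_succ_cons, List.drop_zero] at this ⊢
        show pvRowLoopB C (y :: z :: l) (z :: l) l (pvInnerB C x y z ans) = _
        rw [this]
        rfl

lemma getD_hits (l : List (List Int)) (f : List Int → List Int) (a n : Nat) (ha : a < n) (hn : n ≤ l.length) :
    ((l.take n).map f).getD a [] = f (l.getD a []) := by
  have h : a < l.length := by omega
  rw [List.getD_eq_getElem?_getD, List.getElem?_map, List.getElem?_take]
  simp [ha, List.getElem?_eq_getElem h]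

lemma cols_getD (r0 r1 r2 : List Int) (n : Nat) (h0 : r0.length = n) (h1 : r1.length = n) (h2 : r2.length = n)
    (t : Int) (ht0 : 0 ≤ t) (ht : t < (n:Int)) :
    PySem.List.pyGetD (((r0.zip r1).zip r2).map (fun p => p.1.1 + p.1.2 + p.2)) t 0
      = r0.getD t.toNat 0 + r1.getD t.toNat 0 + r2.getD t.toNat 0 := by
  have htn : t.toNat < n := by omega
  rw [PySem.List.pyGetD_eq_getElem _ 0 ht0 (by simp [h0, h1, h2]; omega)]
  simp only [List.getElem_map, List.getElem_zip]
  rw [List.getD_eq_getElem r0 0 (h0 ▸ htn), List.getD_eq_getElem r1 0 (h1 ▸ htn),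
    List.getD_eq_getElem r2 0 (h2 ▸ htn)]

lemma row_getD (row : List Int) (C : Int) (ind : Int → Int) (t : Nat) (ht : t < C.toNat) (hlen : C ≤ (row.length : Int)) :
    ((row.take C.toNat).map ind).getD t 0 = ind (row.getD t 0) := by
  have h : t < row.length := by omega
  rw [List.getD_eq_getElem?_getD, List.getElem?_map, List.getElem?_take]
  simp [ht, List.getElem?_eq_getElem h]

lemma cellA (board : List (List Int)) (k m : Nat) (t : Int) (ht : 0 ≤ t) :
    PySem.List.pyGetD (PySem.List.pyGetD board ((k : Int) + (m : Int)) []) t 0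
      = (board.getD (k + m) []).getD t.toNat 0 := by
  have h1 : ((k : Int) + (m : Int)) = ((k + m : Nat) : Int) := by push_cast; ring
  rw [h1, PySem.List.pyGetD_natCast]
  rcases Int.eq_ofNat_of_zero_le ht with ⟨u, hu⟩
  rw [hu, PySem.List.pyGetD_natCast]
  simp

-- ===== VERDICT (by name: the statement is the Claim_ definition above) =====
theorem solution_spec : Claim_equal_solution := by
  intro R C board T _ hpre
  show solution R C board T = solution_alt R C board T
  rw [solution_char]
  by_cases hRC : R < 3 ∨ C < 3
  · rw [solution_alt, if_pos hRC]
    rcases hRC with hR | hC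
    · rw [PySem.List.pyRange_one_eq_nil (by omega : R - 2 ≤ 0)]
      rfl
    · rw [PySem.List.pyRange_one_eq_nil (by omega : C - 2 ≤ 0)]
      simp
  · push_neg at hRC
    obtain ⟨hR, hC⟩ := And.intro (hRC.1) (hRC.2)
    obtain ⟨hlen, hrows⟩ := hpre ⟨by omega, by omega⟩
    -- row facts
    have hrowlen : ∀ m, m < R.toNat → C ≤ ((board.getD m []).length : Int) := by
      intro m hm
      have hmb : m < board.length := by omega
      have hmem : board.getD m [] ∈ board.take R.toNat := by
        rw [List.getD_eq_getElem board [] hmb]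
        have he : (board.take R.toNat)[m]'(by simp; omega) = board[m]'hmb := by
          simp [List.getElem_take]
        rw [← he]
        exact List.getElem_mem _
      exact hrows _ hmem
    -- B side normal form
    have hB : solution_alt R C board T =
        pvRowLoopB C
          ((board.take R.toNat).map (fun row =>
            (row.take C.toNat).map (fun x => if x ≥ T then (1 : Int) else 0)))
          (((board.take R.toNat).map (fun row =>
            (row.take C.toNat).map (fun x => if x ≥ T then (1 : Int) else 0))).drop 1)
          (((board.take R.toNat).map (fun row =>
            (row.take C.toNat).map (fun x => if x ≥ T then (1 : Int) else 0))).drop 2) 0 := by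
      simp only [solution_alt, if_neg (by omega : ¬ (R < 3 ∨ C < 3))]
      rw [PySem.List.slice_to board (by omega : (0:Int) ≤ R),
          PySem.List.slice_from _ (by norm_num : (0:Int) ≤ 1),
          PySem.List.slice_from _ (by norm_num : (0:Int) ≤ 2)]
      have hsl : ∀ row : List Int, PySem.List.slice row none (some C) = row.take C.toNat :=
        fun row => PySem.List.slice_to row (by omega)
      simp [hsl]
    rw [hB, rowLoop_eq]
    have hhl : ((board.take R.toNat).map (fun row =>
        (row.take C.toNat).map (fun x => if x ≥ T then (1 : Int) else 0))).length = R.toNat := by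
      simp; omega
    rw [hhl]
    -- A side: to a Nat-range fold
    rw [PySem.List.pyRange_one 0 (R - 2), List.foldl_map,
        (by omega : (R - 2 - 0).toNat = R.toNat - 2)]
    apply PySem.List.foldl_congr_mem
    intro acc k hk
    rw [List.mem_range] at hk
    simp only [zero_add]
    -- B side rows
    rw [getD_hits _ _ k _ (by omega) (by omega),
        getD_hits _ _ (k + 1) _ (by omega) (by omega),
        getD_hits _ _ (k + 2) _ (by omega) (by omega)]
    simp only [pvInnerB]
    apply PySem.List.foldl_congr_mem
    intro a j hj
    rw [PySem.List.mem_pyRange_one] at hj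
    obtain ⟨jn, rfl⟩ := Int.eq_ofNat_of_zero_le hj.1
    have hj2 : (jn : Int) < C - 2 := hj.2
    have hrl : ∀ m, m < R.toNat →
        (((board.getD m []).take C.toNat).map (fun x => if x ≥ T then (1 : Int) else 0)).length = C.toNat := by
      intro m hm
      have := hrowlen m hm
      simp only [List.length_map, List.length_take]
      omega
    have e1 : ((jn : Int) + 1) = ((jn + 1 : Nat) : Int) := by push_cast; ring
    have e2 : ((jn : Int) + 2) = ((jn + 2 : Nat) : Int) := by push_cast; ring
    refine if_congr ?_ rfl rfl
    rw [ge_iff_le]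
    refine Eq.to_iff ?_
    refine congrArg (fun z => 5 ≤ z) ?_
    rw [e1, e2,
        cols_getD _ _ _ C.toNat (hrl k (by omega)) (hrl (k+1) (by omega)) (hrl (k+2) (by omega))
          (jn : Int) (by omega) (by omega),
        cols_getD _ _ _ C.toNat (hrl k (by omega)) (hrl (k+1) (by omega)) (hrl (k+2) (by omega))
          ((jn + 1 : Nat) : Int) (by omega) (by omega),
        cols_getD _ _ _ C.toNat (hrl k (by omega)) (hrl (k+1) (by omega)) (hrl (k+2) (by omega))
          ((jn + 2 : Nat) : Int) (by omega) (by omega)]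
    simp only [Int.toNat_natCast]
    rw [row_getD _ C _ jn (by omega) (hrowlen k (by omega)),
        row_getD _ C _ jn (by omega) (hrowlen (k+1) (by omega)),
        row_getD _ C _ jn (by omega) (hrowlen (k+2) (by omega)),
        row_getD _ C _ (jn+1) (by omega) (hrowlen k (by omega)),
        row_getD _ C _ (jn+1) (by omega) (hrowlen (k+1) (by omega)),
        row_getD _ C _ (jn+1) (by omega) (hrowlen (k+2) (by omega)),
        row_getD _ C _ (jn+2) (by omega) (hrowlen k (by omega)),
        row_getD _ C _ (jn+2) (by omega) (hrowlen (k+1) (by omega)),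
        row_getD _ C _ (jn+2) (by omega) (hrowlen (k+2) (by omega))]
    have hW : pvW board T (k : Int) (jn : Int) =
        (if (board.getD k []).getD jn 0 ≥ T then (1:Int) else 0) +
        ((if (board.getD k []).getD (jn+1) 0 ≥ T then (1:Int) else 0) +
        ((if (board.getD k []).getD (jn+2) 0 ≥ T then (1:Int) else 0) +
        ((if (board.getD (k+1) []).getD jn 0 ≥ T then (1:Int) else 0) +
        ((if (board.getD (k+1) []).getD (jn+1) 0 ≥ T then (1:Int) else 0) +
        ((if (board.getD (k+1) []).getD (jn+2) 0 ≥ T then (1:Int) else 0) +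
        ((if (board.getD (k+2) []).getD jn 0 ≥ T then (1:Int) else 0) +
        ((if (board.getD (k+2) []).getD (jn+1) 0 ≥ T then (1:Int) else 0) +
        ((if (board.getD (k+2) []).getD (jn+2) 0 ≥ T then (1:Int) else 0) + 0)))))))) := by
      simp only [pvW, pvWin, pvCell, List.map_cons, List.map_nil, List.sum_cons, List.sum_nil]
      rw [(by ring : ((k:Int) + 0) = ((k:Int) + ((0:Nat):Int))),
          (by push_cast; ring : ((k:Int) + 1) = ((k:Int) + ((1:Nat):Int))),
          (by push_cast; ring : ((k:Int) + 2) = ((k:Int) + ((2:Nat):Int)))]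
      rw [(by ring : ((jn:Int) + 0) = (jn:Int)), e1, e2]
      rw [cellA board k 0 (jn:Int) (by omega), cellA board k 0 ((jn+1:Nat):Int) (by omega),
          cellA board k 0 ((jn+2:Nat):Int) (by omega),
          cellA board k 1 (jn:Int) (by omega), cellA board k 1 ((jn+1:Nat):Int) (by omega),
          cellA board k 1 ((jn+2:Nat):Int) (by omega),
          cellA board k 2 (jn:Int) (by omega), cellA board k 2 ((jn+1:Nat):Int) (by omega),
          cellA board k 2 ((jn+2:Nat):Int) (by omega)]
      simp only [pvInd, Int.toNat_natCast, Nat.add_zero]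
      rfl
    rw [hW]
    ring
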